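-- pv_equiv track=rewrite | github.com/jissssu/Algorithm | 백준/Gold/17140. 이차원 배열과 연산/이차원 배열과 연산.py | operation_R
-- ===== SOURCE A (Python) =====
-- from collections import Counter
--
-- def operation_R(A):
--     max_len = 0
--     new_A = []
--     for row in A:
--         counter = Counter(x for x in row if x != 0)
--         temp = sorted(counter.items(), key=lambda x: (x[1], x[0]))
--         new_row = []
--         for num, cnt in temp:
--             new_row.extend([num, cnt])
--         max_len = max(max_len, len(new_row))
--         new_A.append(new_row)
--
--     # 100개 초과 자르기
--     max_len = min(max_len, 100)
--     for i in range(len(new_A)):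
--         if len(new_A[i]) < max_len:
--             new_A[i].extend([0] * (max_len - len(new_A[i])))
--         else:
--             new_A[i] = new_A[i][:max_len]
--
--     return new_A
-- ===== SOURCE B (Python) =====
-- from collections import Counter
--
-- def operation_R(A):
--     # Per row: no pair sort. Enumerate the occurring counts in increasing order and,
--     # for each count, emit the (sorted distinct) values having that count.
--     rows = []
--     for row in A:
--         cnt = Counter(x for x in row if x != 0)
--         vals = sorted(cnt)
--         flat = []
--         for c in sorted(set(cnt.values())):
--             for v in vals:
--                 if cnt[v] == c:
--                     flat += [v, c]
--         rows.append(flat)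
--     m = min(max([0] + [len(r) for r in rows]), 100)
--     return [(r + [0] * m)[:m] for r in rows]
-- ===== Notes on version B (the rewrite author's own statement) =====
-- stated objective: alternative
-- what changed: Eliminates A's comparison sort of (count,value) pairs: B never sorts pairs at all, instead it enumerates the occurring counts in increasing order (sorted set of counter values) and, inside each count bucket, scans the sorted distinct values, emitting [value,count] directly in final order; padding becomes a uniform pad-then-slice comprehension instead of A's branching in-place pass.
import Mathlib
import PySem

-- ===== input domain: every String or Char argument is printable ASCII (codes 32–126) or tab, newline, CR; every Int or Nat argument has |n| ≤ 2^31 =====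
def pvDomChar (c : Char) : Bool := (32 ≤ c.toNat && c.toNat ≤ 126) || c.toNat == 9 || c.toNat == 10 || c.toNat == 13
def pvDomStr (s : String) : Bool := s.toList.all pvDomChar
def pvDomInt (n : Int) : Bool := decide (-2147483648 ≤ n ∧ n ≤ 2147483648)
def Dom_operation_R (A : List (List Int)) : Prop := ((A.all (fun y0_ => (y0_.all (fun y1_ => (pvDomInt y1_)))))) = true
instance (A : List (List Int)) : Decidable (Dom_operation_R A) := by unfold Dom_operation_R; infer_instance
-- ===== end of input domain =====

-- B removes A's comparison sort of (count,value) pairs: it enumerates the occurring counts in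
-- increasing order and scans the sorted distinct values inside each count bucket, emitting
-- [value,count] directly in final order; padding becomes a uniform pad-then-slice pass.
-- A mutates its local new_A only; the input A is not mutated by either version.

-- ===== PORT A =====
-- Counter(x for x in row if x != 0), sorted by (count, value), flattened to [num, cnt, ...]
def opA_row (row : List Int) : List Int :=
  (PySem.List.sorted2 (PySem.Dict.counter (row.filter (fun x => x != 0))).items
      (fun p => p.2) (fun p => p.1)).foldl (fun acc p => acc ++ [p.1, p.2]) []

-- the first for-loop: collect the new rows, tracking max_len
def opA_fold (A : List (List Int)) : Int × List (List Int) :=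
  A.foldl (fun (acc : Int × List (List Int)) row =>
      (max acc.1 ((opA_row row).length : Int), acc.2 ++ [opA_row row])) (0, [])

def operation_R (A : List (List Int)) : List (List Int) :=
  -- the second for-loop rewrites each new_A[i] in place; ported as a positionwise map
  (opA_fold A).2.map (fun r =>
    if (r.length : Int) < min (opA_fold A).1 100 then
      r ++ PySem.List.pyRepeat [0] (min (opA_fold A).1 100 - (r.length : Int))
    else PySem.List.slice r none (some (min (opA_fold A).1 100)))

-- ===== PORT B =====
-- Source B's bucket pass: for c in sorted(set(cnt.values())): for v in sorted(cnt): if cnt[v]==c: flat += [v, c]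
def opB_row (row : List Int) : List Int :=
  let cnt := PySem.Dict.counter (row.filter (fun x => x != 0))
  let vals := PySem.List.sorted cnt.keys (fun x => x)
  (PySem.List.sorted (PySem.Set.ofList cnt.values) (fun c => c)).foldl
    (fun flat c => vals.foldl
      (fun flat v => if cnt.getD v 0 == c then flat ++ [v, c] else flat) flat) []

def operation_R_alt (A : List (List Int)) : List (List Int) :=
  let rows := A.map opB_row
  -- m = min(max([0] + [len(r) for r in rows]), 100)
  let m := min ((rows.map (fun r => (r.length : Int))).foldl max 0) 100
  rows.map (fun r => PySem.List.slice (r ++ PySem.List.pyRepeat [0] m) none (some m))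

-- ===== PRECONDITION & SPEC =====
def Spec_operation_R (A : List (List Int)) (out : List (List Int)) : Prop := out = operation_R_alt A
instance (A : List (List Int)) (out : List (List Int)) : Decidable (Spec_operation_R A out) := by unfold Spec_operation_R; infer_instance

-- ===== CLAIM (what is proved, stated in full; the proofs are below) =====
def Claim_equal_operation_R : Prop := ∀ (A : List (List Int)), Dom_operation_R A → Spec_operation_R A (operation_R A)

-- ===== LEMMAS AND PROOFS =====

-- Python's tuple sort key (k1 x, k2 x) is the lexicographic order: sorted2 is sorted with a Lex key
theorem sorted2_eq_sorted_toLex {α : Type} (xs : List α) (k1 k2 : α → Int) :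
    PySem.List.sorted2 xs k1 k2 = PySem.List.sorted xs (fun a => toLex (k1 a, k2 a)) := by
  rw [PySem.List.sorted_eq_foldl_insertBy]
  show List.foldl (fun acc x => PySem.List.insertBy
      (fun a b => decide (k1 a < k1 b) || !decide (k1 b < k1 a) && decide (k2 a < k2 b)) x acc) [] xs = _
  congr 1
  funext acc x
  congr 1
  funext a b
  have hlt : (toLex (k1 a, k2 a) < toLex (k1 b, k2 b)) ↔
      (k1 a < k1 b ∨ k1 a = k1 b ∧ k2 a < k2 b) := Prod.Lex.lt_iff
  refine Bool.eq_iff_iff.mpr ?_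
  simp only [Bool.or_eq_true, Bool.and_eq_true, Bool.not_eq_eq_eq_not, Bool.not_true,
    decide_eq_true_eq, decide_eq_false_iff_not, hlt]
  omega

-- a flatMap is pairwise when each chunk is and chunks relate crosswise
theorem pairwise_flatMap {α β : Type} {R : α → α → Prop} (cs : List β) (g : β → List α)
    (h1 : ∀ c ∈ cs, (g c).Pairwise R)
    (h2 : cs.Pairwise (fun c d => ∀ a ∈ g c, ∀ b ∈ g d, R a b)) :
    (cs.flatMap g).Pairwise R := by
  induction cs with
  | nil => simp
  | cons c cs ih =>
      rw [List.flatMap_cons, List.pairwise_append]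
      have hc := List.pairwise_cons.mp h2
      refine ⟨h1 c (by simp), ih (fun d hd => h1 d (by simp [hd])) hc.2, ?_⟩
      intro a ha b hb
      obtain ⟨d, hd, hbd⟩ := List.mem_flatMap.mp hb
      exact hc.1 d hd a ha b hbd

-- bucketing a list by a key over a duplicate-free list of all its key values is a permutation
theorem flatMap_filter_perm {α : Type} [DecidableEq α] (f : α → Int) :
    ∀ (cs : List Int) (xs : List α), cs.Nodup → (∀ x ∈ xs, f x ∈ cs) →
    (cs.flatMap (fun c => xs.filter (fun x => f x == c))).Perm xs := by
  intro cs
  induction cs with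
  | nil =>
      intro xs _ hmem
      have : xs = [] := by
        cases xs with
        | nil => rfl
        | cons y ys => exact absurd (hmem y (by simp)) (by simp)
      simp [this]
  | cons c cs ih =>
      intro xs hnd hmem
      rw [List.flatMap_cons]
      have hnd' := List.nodup_cons.mp hnd
      have hsub : ∀ c' ∈ cs, xs.filter (fun x => f x == c')
          = (xs.filter (fun x => !(f x == c))).filter (fun x => f x == c') := by
        intro c' hc'
        rw [List.filter_filter]
        refine (List.filter_congr ?_).symm
        intro x _
        by_cases h : f x = c'
        · have hne : c' ≠ c := fun he => hnd'.1 (he ▸ hc')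
          simp [h, hne]
        · simp [h]
      have hflat : cs.flatMap (fun c' => xs.filter (fun x => f x == c'))
          = cs.flatMap (fun c' => (xs.filter (fun x => !(f x == c))).filter (fun x => f x == c')) :=
        List.flatMap_congr (fun c' hc' => hsub c' hc')
      rw [hflat]
      have hih : (cs.flatMap (fun c' => (xs.filter (fun x => !(f x == c))).filter
          (fun x => f x == c'))).Perm (xs.filter (fun x => !(f x == c))) := by
        refine ih _ hnd'.2 ?_
        intro x hx
        have hx1 := List.mem_filter.mp hx
        have := hmem x hx1.1
        rcases List.mem_cons.mp this with h | h
        · exfalso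
          have hcontra := hx1.2
          rw [h] at hcontra
          simp at hcontra
        · exact h
      exact List.Perm.trans (List.Perm.append_left _ hih) (List.filter_append_perm _ xs)

-- flatMap with a conditional chunk is flatMap over the filter
theorem flatMap_ite {α β : Type} (xs : List α) (p : α → Bool) (h : α → List β) :
    xs.flatMap (fun x => if p x then h x else []) = (xs.filter p).flatMap h := by
  induction xs with
  | nil => rfl
  | cons x t ih =>
      by_cases hp : p x = true
      · simp [List.flatMap_cons, hp, ih]
      · simp only [Bool.not_eq_true] at hp
        simp [List.flatMap_cons, hp, ih]

-- the heart: A's row transform equals B's bucket pass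
theorem row_eq (row : List Int) : opA_row row = opB_row row := by
  unfold opA_row opB_row
  simp only []
  set nz := row.filter (fun x => x != 0) with hnz
  set cnt := PySem.Dict.counter nz with hcnt
  have hkeys : cnt.keys = PySem.Set.ofList nz := PySem.Dict.keys_counter nz
  set f : Int → Int := fun v => cnt.getD v 0 with hf
  have hfc : ∀ v, f v = (nz.count v : Int) := fun v => PySem.Dict.getD_counter nz v
  set vals := PySem.List.sorted cnt.keys (fun x => x) with hvals
  set cs := PySem.List.sorted (PySem.Set.ofList cnt.values) (fun c => c) with hcs
  -- order facts
  have hvlt : vals.Pairwise (· < ·) := by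
    rw [hvals, hkeys]; exact PySem.List.sorted_ofList_pairwise_lt nz
  have hclt : cs.Pairwise (· < ·) := PySem.List.sorted_ofList_pairwise_lt cnt.values
  have hcnd : cs.Nodup := hclt.imp ne_of_lt
  -- membership: every value's count occurs in cs
  have hvmem : ∀ v ∈ vals, f v ∈ cs := by
    intro v hv
    have hvk : v ∈ cnt.keys := (PySem.List.mem_sorted _ _ _ _).mp hv
    have : (v, f v) ∈ cnt.items := by
      rw [hcnt, PySem.Dict.items_counter]
      rw [hcnt] at hkeys
      rw [hkeys] at hvk
      exact List.mem_map.mpr ⟨v, hvk, by rw [hfc v]⟩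
    have hval : f v ∈ cnt.values := by
      have : f v ∈ cnt.items.map (·.2) := List.mem_map.mpr ⟨(v, f v), this, rfl⟩
      simpa [PySem.Dict.values] using this
    rw [hcs]
    exact (PySem.List.mem_sorted _ _ _ _).mpr ((PySem.Set.mem_ofList _ _).mpr hval)
  -- the pair list B produces, in order
  set Lp : List (Int × Int) :=
    cs.flatMap (fun c => (vals.filter (fun v => f v == c)).map (fun v => (v, c))) with hLp
  -- Lp is a permutation of counter items
  have hbase : (cs.flatMap (fun c => vals.filter (fun v => f v == c))).Perm vals :=
    flatMap_filter_perm f cs vals hcnd hvmem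
  have hLpmap : Lp = (cs.flatMap (fun c => vals.filter (fun v => f v == c))).map
      (fun v => (v, f v)) := by
    rw [hLp, List.map_flatMap]
    refine List.flatMap_congr ?_
    intro c _
    refine List.map_congr_left ?_
    intro v hv
    have := (List.mem_filter.mp hv).2
    simp only [beq_iff_eq] at this
    rw [this]
  have hperm : Lp.Perm cnt.items := by
    rw [hLpmap, hcnt, PySem.Dict.items_counter]
    have h1 : ((cs.flatMap (fun c => vals.filter (fun v => f v == c))).map
        (fun v => (v, f v))).Perm (vals.map (fun v => (v, f v))) := hbase.map _
    have h2 : vals.Perm (PySem.Set.ofList nz) := by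
      rw [hvals, hkeys]; exact PySem.List.sorted_perm _ _ _
    have h3 : (vals.map (fun v => (v, f v))).Perm
        ((PySem.Set.ofList nz).map (fun v => (v, f v))) := h2.map _
    refine (h1.trans h3).trans ?_
    have : (fun v : Int => (v, f v)) = (fun k : Int => (k, (nz.count k : Int))) := by
      funext v; rw [hfc v]
    rw [this]
  -- Lp is strictly increasing in the (count, value) key
  have hpw : Lp.Pairwise (fun p q : Int × Int =>
      (fun p : Int × Int => toLex (p.2, p.1)) p < (fun p : Int × Int => toLex (p.2, p.1)) q) := by
    rw [hLp]
    refine pairwise_flatMap cs _ ?_ ?_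
    · intro c _
      rw [List.pairwise_map]
      refine (hvlt.filter _).imp ?_
      intro a b hab
      exact Prod.Lex.lt_iff.mpr (Or.inr ⟨rfl, hab⟩)
    · refine hclt.imp ?_
      intro c d hcd a ha b hb
      obtain ⟨_, _, rfl⟩ := List.mem_map.mp ha
      obtain ⟨_, _, rfl⟩ := List.mem_map.mp hb
      exact Prod.Lex.lt_iff.mpr (Or.inl hcd)
  -- A's sorted pair list IS Lp
  have hA : PySem.List.sorted2 cnt.items (fun p => p.2) (fun p => p.1) = Lp := by
    rw [sorted2_eq_sorted_toLex]
    exact PySem.List.sorted_eq_of_perm_of_pairwise_lt _ _ _ hperm hpw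
  rw [hA]
  -- flatten both sides to flatMaps and compare
  rw [PySem.List.foldl_append_eq_flatMap, hLp, List.flatMap_assoc]
  have hout : ∀ (c : Int) (acc : List Int), vals.foldl
      (fun flat v => if f v == c then flat ++ [v, c] else flat) acc
      = acc ++ (vals.filter (fun v => f v == c)).flatMap (fun v => [v, c]) := by
    intro c acc
    have hbody : (fun (flat : List Int) v => if f v == c then flat ++ [v, c] else flat)
        = fun flat v => flat ++ (if f v == c then [v, c] else []) := by
      funext flat v; split_ifs <;> simp
    rw [hbody, PySem.List.foldl_append_eq_flatMap, flatMap_ite]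
  have houter : ∀ (acc : List Int), cs.foldl (fun flat c => vals.foldl
      (fun flat v => if f v == c then flat ++ [v, c] else flat) flat) acc
      = acc ++ cs.flatMap (fun c => (vals.filter (fun v => f v == c)).flatMap (fun v => [v, c])) := by
    intro acc
    have : (fun (flat : List Int) c => vals.foldl
        (fun flat v => if f v == c then flat ++ [v, c] else flat) flat)
        = fun flat c => flat ++ (vals.filter (fun v => f v == c)).flatMap (fun v => [v, c]) := by
      funext flat c; exact hout c flat
    rw [this, PySem.List.foldl_append_eq_flatMap]
  rw [houter]
  simp only [List.nil_append]
  refine List.flatMap_congr ?_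
  intro c _
  rw [List.flatMap_map]

-- A's first loop computes (running max of row lengths, list of transformed rows)
theorem opA_fold_spec : ∀ (A : List (List Int)) (c : Int) (acc : List (List Int)),
    A.foldl (fun (acc : Int × List (List Int)) row =>
        (max acc.1 ((opA_row row).length : Int), acc.2 ++ [opA_row row])) (c, acc)
      = ((A.map (fun r => ((opA_row r).length : Int))).foldl max c, acc ++ A.map opA_row) := by
  intro A
  induction A with
  | nil => intro c acc; simp
  | cons r rs ih => intro c acc; simp [ih]

theorem foldl_max_nonneg (l : List Int) : ∀ (c : Int), 0 ≤ c → 0 ≤ l.foldl max c := by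
  induction l with
  | nil => intro c hc; simpa using hc
  | cons x t ih => intro c hc; exact ih _ (le_trans hc (le_max_left c x))

-- A's branching pad-or-slice equals B's uniform pad-then-slice
theorem pad_eq (r : List Int) (m : Int) (hm : 0 ≤ m) :
    (if (r.length : Int) < m then r ++ PySem.List.pyRepeat [0] (m - (r.length : Int))
     else PySem.List.slice r none (some m))
    = PySem.List.slice (r ++ PySem.List.pyRepeat [0] m) none (some m) := by
  rw [PySem.List.pyRepeat_singleton, PySem.List.pyRepeat_singleton,
    PySem.List.slice_to _ hm, PySem.List.slice_to _ hm]
  split_ifs with h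
  · rw [List.take_append, List.take_of_length_le (by omega), List.take_replicate,
      min_eq_left (Nat.sub_le _ _)]
    have h2 : (m - (r.length : Int)).toNat = m.toNat - r.length := by omega
    rw [h2]
  · rw [List.take_append, List.take_replicate]
    have h1 : m.toNat - r.length = 0 := by omega
    rw [h1]
    simp

-- ===== VERDICT (by name: the statement is the Claim_ definition above) =====
theorem operation_R_spec : Claim_equal_operation_R := by
  intro A _
  unfold Spec_operation_R operation_R operation_R_alt opA_fold
  rw [opA_fold_spec]
  have hrows : A.map opA_row = A.map opB_row := List.map_congr_left (fun r _ => row_eq r)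
  have hlen : A.map (fun r => ((opA_row r).length : Int))
      = (A.map opB_row).map (fun r => (r.length : Int)) := by
    rw [List.map_map]
    exact List.map_congr_left (fun r _ => by simp [row_eq r])
  simp only [List.nil_append, hrows, hlen]
  have hm : (0 : Int) ≤ min ((((A.map opB_row).map (fun r => (r.length : Int))).foldl max 0)) 100 :=
    le_min (foldl_max_nonneg _ 0 le_rfl) (by norm_num)
  exact List.map_congr_left (fun r _ => pad_eq r _ hm)
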